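-- pv_equiv track=rewrite | github.com/ggetzie/nnr | main/utils.py | sortify
-- ===== SOURCE A (Python) =====
-- STOPWORDS = {"i","me","my","myself","we","our","ours","ourselves","you","your",
--              "yours", "yourself","yourselves","he","him","his","himself","she",
--              "her","hers","herself","it","its","itself","they","them","their",
--              "theirs","themselves","what","which","who","whom","this","that",
--              "these","those","am","is","are","was","were","be","been","being",
--              "have","has","had","having","do","does","did","doing","a","an",
--              "the","and","but","if","or","because","as","until","while","of",
--              "at","by","for","with","about","against","between","into","through",
--              "during","before","after","above","below","to","from","up","down",
--              "in","out","on","off","over","under","again","further","then",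
--              "once","here","there","when","where","why","how","all","any","both",
--              "each","few","more","most","other","some","such","no","nor","not",
--              "only","own","same","so","than","too","very","s","t","can","will",
--              "just","don","should","now", "best"}
--
-- def sortify(slug, stopwords=STOPWORDS):
--     title_words = slug.split("-")
--     for i, word in enumerate(title_words):
--         if word in stopwords:
--             continue
--         else:
--             first_letter = "0-9" if word[0].isdigit() else word[0].upper()
--             sort_title = "-".join(title_words[i:])
--             return first_letter, sort_title
-- ===== SOURCE B (Python) =====
-- STOPWORDS = {"i","me","my","myself","we","our","ours","ourselves","you","your",
--              "yours", "yourself","yourselves","he","him","his","himself","she",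
--              "her","hers","herself","it","its","itself","they","them","their",
--              "theirs","themselves","what","which","who","whom","this","that",
--              "these","those","am","is","are","was","were","be","been","being",
--              "have","has","had","having","do","does","did","doing","a","an",
--              "the","and","but","if","or","because","as","until","while","of",
--              "at","by","for","with","about","against","between","into","through",
--              "during","before","after","above","below","to","from","up","down",
--              "in","out","on","off","over","under","again","further","then",
--              "once","here","there","when","where","why","how","all","any","both",
--              "each","few","more","most","other","some","such","no","nor","not",
--              "only","own","same","so","than","too","very","s","t","can","will",
--              "just","don","should","now", "best"}
--
--
-- def sortify(slug, stopwords=STOPWORDS):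
--     # stage 1: trim the leading run of stopwords off the word list
--     remaining = slug.split("-")
--     while remaining and remaining[0] in stopwords:
--         remaining = remaining[1:]
--     # stage 2: build the result from what is left
--     if not remaining:
--         return None
--     word = remaining[0]
--     first_letter = "0-9" if word[0].isdigit() else word[0].upper()
--     return first_letter, "-".join(remaining)
-- ===== Notes on version B (the rewrite author's own statement) =====
-- stated objective: alternative
-- what changed: Splits A's single indexed loop (enumerate, continue, slice-and-join inside the loop body with an early return) into two separate stages: first trim the leading run of stopwords off the word list, then build the (letter key, joined title) result once from the trimmed list.
import Mathlib
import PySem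

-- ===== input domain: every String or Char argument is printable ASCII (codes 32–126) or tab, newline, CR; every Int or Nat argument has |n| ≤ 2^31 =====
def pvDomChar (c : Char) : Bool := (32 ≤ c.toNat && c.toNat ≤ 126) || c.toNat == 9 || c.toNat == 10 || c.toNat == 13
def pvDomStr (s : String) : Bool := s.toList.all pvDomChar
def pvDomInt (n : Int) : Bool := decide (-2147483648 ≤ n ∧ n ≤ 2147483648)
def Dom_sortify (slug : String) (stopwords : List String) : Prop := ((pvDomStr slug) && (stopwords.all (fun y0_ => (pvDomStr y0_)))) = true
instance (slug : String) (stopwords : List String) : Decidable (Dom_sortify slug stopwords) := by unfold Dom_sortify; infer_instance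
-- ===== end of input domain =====

-- B splits A's single indexed loop into two stages: trim the leading stopwords off the
-- word list, then build the result once from the trimmed list; alternative decomposition.

-- ===== PORT A =====
-- the for-loop over enumerate(title_words) with early return
def sortifyLoop (title_words stopwords : List String) : List (Int × String) → Option (String × String)
  | [] => none                                  -- loop falls through: implicit None
  | (i, word) :: rest =>
    if stopwords.contains word then
      sortifyLoop title_words stopwords rest    -- continue
    else
      match word.toList with
      | [] => none                              -- word[0] raises IndexError in Python; excluded by Pre_sortify
      | c :: _ =>
        some (if PySem.Chars.isdigit c then "0-9" else String.mk [PySem.Chars.upperChar c],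
              PySem.Str.join "-" (PySem.List.slice title_words (some i) none))

def sortify (slug : String) (stopwords : List String) : Option (String × String) :=
  let title_words := (PySem.Chars.splitOn slug.toList ['-']).map String.mk  -- slug.split("-"), sep ≠ "" so exact
  sortifyLoop title_words stopwords (PySem.List.enumerate title_words 0)

-- ===== PORT B =====
-- stage 1: the while loop 'while remaining and remaining[0] in stopwords: remaining = remaining[1:]'
def trimStops (stopwords : List String) : List String → List String
  | [] => []
  | w :: rest => if stopwords.contains w then trimStops stopwords rest else w :: rest

-- stage 2: build the result from the trimmed list
def sortify_alt (slug : String) (stopwords : List String) : Option (String × String) :=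
  match trimStops stopwords ((PySem.Chars.splitOn slug.toList ['-']).map String.mk) with
  | [] => none                                  -- not remaining: return None
  | word :: rest =>                             -- word = remaining[0]
    match word.toList with
    | [] => none                                -- word[0] raises IndexError in Python; excluded by Pre_sortify
    | c :: _ =>
      some (if PySem.Chars.isdigit c then "0-9" else String.mk [PySem.Chars.upperChar c],
            PySem.Str.join "-" (word :: rest))  -- "-".join(remaining)

-- ===== PRECONDITION & SPEC =====
-- Pre_ excludes exactly the inputs where the first non-stopword word of the slug is the
-- empty string: there Python A (and B alike) raises IndexError on word[0].
def Pre_sortify (slug : String) (stopwords : List String) : Prop :=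
  ∀ w ∈ (((PySem.Chars.splitOn slug.toList ['-']).map String.mk).dropWhile
          (fun w => stopwords.contains w)).take 1, w ≠ ""
instance (slug : String) (stopwords : List String) : Decidable (Pre_sortify slug stopwords) := by
  unfold Pre_sortify; infer_instance

def pvWitness_sortify : String × List String := ("the-3rd-man", ["the"])

def Spec_sortify (slug : String) (stopwords : List String) (out : Option (String × String)) : Prop := out = sortify_alt slug stopwords
instance (slug : String) (stopwords : List String) (out : Option (String × String)) : Decidable (Spec_sortify slug stopwords out) := by unfold Spec_sortify; infer_instance

-- ===== CLAIM (what is proved, stated in full; the proofs are below) =====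
def Claim_equal_sortify : Prop := ∀ (slug : String) (stopwords : List String), Dom_sortify slug stopwords → Pre_sortify slug stopwords → Spec_sortify slug stopwords (sortify slug stopwords)

-- ===== LEMMAS AND PROOFS =====

-- loop invariant: when the enumerate suffix starts at index i and tw.drop i is exactly
-- that suffix, A's loop computes B's two-stage result on the suffix
lemma sortifyLoop_eq_trim (sw : List String) :
    ∀ (ws : List String) (i : Nat) (tw : List String), tw.drop i = ws →
      sortifyLoop tw sw (PySem.List.enumerate ws (i : Int)) =
        (match trimStops sw ws with
         | [] => none
         | word :: rest =>
           match word.toList with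
           | [] => none
           | c :: _ =>
             some (if PySem.Chars.isdigit c then "0-9" else String.mk [PySem.Chars.upperChar c],
                   PySem.Str.join "-" (word :: rest))) := by
  intro ws
  induction ws with
  | nil => intro i tw _; simp [sortifyLoop, trimStops, PySem.List.enumerate]
  | cons w rest ih =>
    intro i tw h
    rw [PySem.List.enumerate_cons]
    show sortifyLoop tw sw ((i, w) :: PySem.List.enumerate rest ((i : Int) + 1)) = _
    simp only [sortifyLoop, trimStops]
    by_cases hc : sw.contains w
    · have hdrop : tw.drop (i + 1) = rest := by
        have h2 : tw.drop (i + 1) = (tw.drop i).drop 1 := by rw [List.drop_drop]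
        rw [h2, h]; rfl
      have h1 : ((i : Int) + 1) = ((i + 1 : Nat) : Int) := by omega
      simp only [hc, if_true, h1]
      exact ih (i + 1) tw hdrop
    · have hslice : PySem.List.slice tw (some (i : Int)) none = w :: rest := by
        rw [PySem.List.slice_from tw (by positivity)]
        simpa using h
      rw [hslice]
      simp only [hc]
      rfl

-- ===== VERDICT (by name: the statement is the Claim_ definition above) =====
theorem sortify_spec : Claim_equal_sortify := by
  intro slug stopwords _ _
  unfold Spec_sortify sortify sortify_alt
  have h := sortifyLoop_eq_trim stopwords
    ((PySem.Chars.splitOn slug.toList ['-']).map String.mk) 0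
    ((PySem.Chars.splitOn slug.toList ['-']).map String.mk) (List.drop_zero)
  simpa using h
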